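-- pv_equiv track=rewrite | github.com/Jeffrey-Sardina/Focl-ir-Tr-chtais | scripts/sitegen.py | ga_italics_filter
-- ===== SOURCE A (Python) =====
-- def italics(text):
--     return f"<i>{text}</i>"
--
-- def ga_italics_filter(render_str):
--     # some terms are not translated and should be italicised
--     to_italicise = [
--         "softmax",
--         "ReLU"
--     ]
--     for item in to_italicise:
--         render_str = render_str.replace(item, italics(item))
--     return render_str
-- ===== SOURCE B (Python) =====
-- def ga_italics_filter(render_str):
--     # single left-to-right scan wrapping each untranslated term, instead of one full replace pass per term
--     out = []
--     i = 0
--     n = len(render_str)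
--     while i < n:
--         if render_str.startswith("softmax", i):
--             out.append("<i>softmax</i>")
--             i += 7
--         elif render_str.startswith("ReLU", i):
--             out.append("<i>ReLU</i>")
--             i += 4
--         else:
--             out.append(render_str[i])
--             i += 1
--     return "".join(out)
-- ===== Notes on version B (the rewrite author's own statement) =====
-- stated objective: alternative
-- what changed: Replaces the per-term sequential str.replace passes with a single left-to-right scan that matches either term at the current position and wraps it, building the output once.
import Mathlib
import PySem

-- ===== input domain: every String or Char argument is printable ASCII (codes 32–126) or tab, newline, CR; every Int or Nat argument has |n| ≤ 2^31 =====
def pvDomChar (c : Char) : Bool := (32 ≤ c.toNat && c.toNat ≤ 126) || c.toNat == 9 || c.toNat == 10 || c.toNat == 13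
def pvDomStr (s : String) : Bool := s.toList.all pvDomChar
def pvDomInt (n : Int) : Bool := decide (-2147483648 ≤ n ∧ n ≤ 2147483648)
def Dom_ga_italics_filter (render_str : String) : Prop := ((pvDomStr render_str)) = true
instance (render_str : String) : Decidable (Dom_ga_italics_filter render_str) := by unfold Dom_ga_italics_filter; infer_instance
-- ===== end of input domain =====

-- B replaces the per-term sequential replace passes by one left-to-right scan; alternative structure, same output.

-- ===== PORT A =====
def italics (text : String) : String := "<i>" ++ text ++ "</i>"

def ga_italics_filter (render_str : String) : String :=
  ["softmax", "ReLU"].foldl (fun r item => PySem.Str.replace r item (italics item)) render_str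

-- ===== PORT B =====
-- the while loop over index i becomes structural recursion on the remaining suffix;
-- startswith(term, i) is isPrefixOf on the suffix, i += 7 / 4 is dropping the matched term
def gaScan : List Char → List Char
  | [] => []
  | c :: t =>
    if "softmax".toList.isPrefixOf (c :: t) then "<i>softmax</i>".toList ++ gaScan (t.drop 6)
    else if "ReLU".toList.isPrefixOf (c :: t) then "<i>ReLU</i>".toList ++ gaScan (t.drop 3)
    else c :: gaScan t
termination_by l => l.length
decreasing_by all_goals (simp; try omega)

def ga_italics_filter_alt (render_str : String) : String :=
  String.ofList (gaScan render_str.toList)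

-- ===== PRECONDITION & SPEC =====
def Spec_ga_italics_filter (render_str : String) (out : String) : Prop := out = ga_italics_filter_alt render_str
instance (render_str : String) (out : String) : Decidable (Spec_ga_italics_filter render_str out) := by unfold Spec_ga_italics_filter; infer_instance

-- ===== CLAIM (what is proved, stated in full; the proofs are below) =====
def Claim_equal_ga_italics_filter : Prop := ∀ (render_str : String), Dom_ga_italics_filter render_str → Spec_ga_italics_filter render_str (ga_italics_filter render_str)

-- ===== LEMMAS AND PROOFS =====

set_option maxRecDepth 10000

-- structural characterisation of one sequential-replace pass (used only with old ≠ [])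
def repl1 (old new : List Char) : List Char → List Char
  | [] => []
  | c :: t =>
    if old.isPrefixOf (c :: t) then new ++ repl1 old new (t.drop (old.length - 1))
    else c :: repl1 old new t
termination_by l => l.length
decreasing_by all_goals (simp; try omega)

theorem replace_go_eq (old new : List Char) (ho : old ≠ []) :
    ∀ (fuel : Nat) (l acc : List Char), l.length ≤ fuel →
      PySem.Chars.replace.go old new fuel l acc = acc.reverse ++ repl1 old new l := by
  intro fuel
  induction fuel with
  | zero =>
    intro l acc h
    have hl : l = [] := by cases l with
      | nil => rfl
      | cons c t => simp at h
    subst hl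
    simp [PySem.Chars.replace.go, repl1]
  | succ n ih =>
    intro l acc h
    cases l with
    | nil => simp [PySem.Chars.replace.go, repl1]
    | cons c t =>
      obtain ⟨o, os, rfl⟩ : ∃ o os, old = o :: os := by
        cases old with
        | nil => exact absurd rfl ho
        | cons o os => exact ⟨o, os, rfl⟩
      rw [PySem.Chars.replace.go]
      by_cases hp : (o :: os).isPrefixOf (c :: t) = true
      · rw [if_pos hp,
            ih _ _ (by simp only [List.length_drop, List.length_cons] at h ⊢; omega),
            repl1, if_pos hp]
        simp [List.reverse_append]
      · rw [if_neg hp, ih t (c :: acc) (by simp at h; omega), repl1, if_neg hp]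
        simp

theorem replace_eq_repl1 (s old new : List Char) (ho : old ≠ []) :
    PySem.Chars.replace s old new = repl1 old new s := by
  rw [PySem.Chars.replace]
  have he : old.isEmpty = false := by cases old with
    | nil => exact absurd rfl ho
    | cons o os => rfl
  rw [he]
  simp only [Bool.false_eq_true, if_false]
  rw [replace_go_eq old new ho s.length s [] (le_refl _)]
  simp

-- repl1 walks char by char past a block whose chars all differ from the pattern head
theorem repl1_push (o : Char) (os nw : List Char) :
    ∀ (p X : List Char), (∀ c ∈ p, c ≠ o) →
      repl1 (o :: os) nw (p ++ X) = p ++ repl1 (o :: os) nw X := by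
  intro p
  induction p with
  | nil => intro X _; simp
  | cons a p' ih =>
    intro X hp
    have ha : a ≠ o := hp a (by simp)
    rw [List.cons_append, repl1]
    have hf : (o :: os).isPrefixOf (a :: (p' ++ X)) = false := by
      simp [List.isPrefixOf]
      intro h; exact absurd h.symm ha
    rw [hf]
    simp only [Bool.false_eq_true, if_false]
    rw [ih X (fun c hc => hp c (by simp [hc]))]
    simp

-- the two generic lemmas instantiated at the concrete patterns (syntactic forms the goals carry)
theorem repl1_push_sm (p X : List Char) (hp : ∀ c ∈ p, c ≠ 's') :
    repl1 "softmax".toList "<i>softmax</i>".toList (p ++ X)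
      = p ++ repl1 "softmax".toList "<i>softmax</i>".toList X :=
  repl1_push 's' "oftmax".toList "<i>softmax</i>".toList p X hp

theorem repl1_push_relu (p X : List Char) (hp : ∀ c ∈ p, c ≠ 'R') :
    repl1 "ReLU".toList "<i>ReLU</i>".toList (p ++ X)
      = p ++ repl1 "ReLU".toList "<i>ReLU</i>".toList X :=
  repl1_push 'R' "eLU".toList "<i>ReLU</i>".toList p X hp

-- replacing a pattern headed o by a replacement headed n0 neither creates nor destroys
-- a prefix made of chars different from both o and n0
theorem repl1_prefix_pres (o n0 : Char) (os ns : List Char) :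
    ∀ (t p : List Char), (∀ c ∈ p, c ≠ o ∧ c ≠ n0) →
      p.isPrefixOf (repl1 (o :: os) (n0 :: ns) t) = p.isPrefixOf t := by
  intro t
  induction t with
  | nil => intro p _; simp [repl1]
  | cons c t' ih =>
    intro p hp
    rw [repl1]
    by_cases hpre : (o :: os).isPrefixOf (c :: t') = true
    · have hc : c = o := by
        simp [List.isPrefixOf] at hpre
        exact hpre.1.symm
      rw [if_pos hpre]
      cases p with
      | nil => simp
      | cons a p' =>
        have ha := hp a (by simp)
        have h1 : (a == n0) = false := by simp [ha.2]
        have h2 : (a == o) = false := by simp [ha.1]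
        simp [List.isPrefixOf, hc, h1, h2]
    · rw [if_neg hpre]
      cases p with
      | nil => simp
      | cons a p' =>
        simp only [List.isPrefixOf, ih p' (fun c hc => hp c (by simp [hc]))]

-- the softmax pass does not create or destroy a leading "ReLU"
theorem repl1_sm_pres_relu (t : List Char) :
    ("ReLU".toList).isPrefixOf (repl1 "softmax".toList "<i>softmax</i>".toList t)
      = ("ReLU".toList).isPrefixOf t :=
  repl1_prefix_pres 's' '<' "oftmax".toList "i>softmax</i>".toList t "ReLU".toList (by simp)

-- the outer ReLU pass fires on a leading "ReLU"
theorem repl1_relu_head (X : List Char) :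
    repl1 "ReLU".toList "<i>ReLU</i>".toList ("ReLU".toList ++ X)
      = "<i>ReLU</i>".toList ++ repl1 "ReLU".toList "<i>ReLU</i>".toList X := by
  rw [show ("ReLU".toList ++ X) = 'R' :: ("eLU".toList ++ X) from rfl]
  rw [show ("ReLU".toList : List Char) = 'R' :: "eLU".toList from rfl]
  rw [repl1]
  have hpre : ('R' :: "eLU".toList).isPrefixOf ('R' :: ("eLU".toList ++ X)) = true := by
    apply List.isPrefixOf_iff_prefix.mpr
    exact List.prefix_append _ _
  rw [if_pos hpre]
  rfl

theorem main_aux : ∀ (n : Nat) (s : List Char), s.length ≤ n →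
    repl1 "ReLU".toList "<i>ReLU</i>".toList
      (repl1 "softmax".toList "<i>softmax</i>".toList s) = gaScan s := by
  intro n
  induction n with
  | zero =>
    intro s h
    have hs : s = [] := by cases s with
      | nil => rfl
      | cons c t => simp at h
    subst hs
    simp [repl1, gaScan]
  | succ n ih =>
    intro s h
    cases s with
    | nil => simp [repl1, gaScan]
    | cons c t =>
      by_cases hp1 : ("softmax".toList).isPrefixOf (c :: t) = true
      · -- the string starts with "softmax"
        rw [repl1, if_pos hp1, show ("softmax".toList.length - 1) = 6 from rfl]
        rw [repl1_push_relu "<i>softmax</i>".toList _ (by simp)]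
        rw [ih (t.drop 6) (by simp at h ⊢; omega)]
        rw [gaScan, if_pos hp1]
      · by_cases hp2 : ("ReLU".toList).isPrefixOf (c :: t) = true
        · -- the string starts with "ReLU" (and not with "softmax")
          obtain ⟨r, hr⟩ : ∃ r, c :: t = "ReLU".toList ++ r := by
            obtain ⟨r, hr⟩ := List.isPrefixOf_iff_prefix.mp hp2
            exact ⟨r, hr.symm⟩
          rw [hr]
          rw [repl1_push_sm "ReLU".toList r (by simp)]
          rw [repl1_relu_head]
          have hlen : r.length ≤ n := by
            have h4 : (c :: t).length = r.length + 4 := by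
              rw [hr]; simp
            simp only [List.length_cons] at h h4
            omega
          rw [ih r hlen]
          rw [show ("ReLU".toList ++ r) = 'R' :: ("eLU".toList ++ r) from rfl, gaScan]
          have hno : ("softmax".toList).isPrefixOf ('R' :: ("eLU".toList ++ r)) = false := by
            rw [show ("softmax".toList : List Char) = 's' :: "oftmax".toList from rfl]
            simp [List.isPrefixOf]
          rw [hno]
          simp only [Bool.false_eq_true, if_false]
          have hyes : ("ReLU".toList).isPrefixOf ('R' :: ("eLU".toList ++ r)) = true := by
            rw [show ('R' :: ("eLU".toList ++ r)) = "ReLU".toList ++ r from rfl]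
            exact List.isPrefixOf_iff_prefix.mpr (List.prefix_append _ _)
          rw [if_pos hyes]
          rfl
        · -- neither term starts here
          rw [repl1, if_neg hp1, repl1]
          have h1 : repl1 "softmax".toList "<i>softmax</i>".toList (c :: t)
              = c :: repl1 "softmax".toList "<i>softmax</i>".toList t := by
            rw [repl1, if_neg hp1]
          have hkey : ("ReLU".toList).isPrefixOf
              (c :: repl1 "softmax".toList "<i>softmax</i>".toList t)
              = ("ReLU".toList).isPrefixOf (c :: t) := by
            rw [← h1]
            exact repl1_sm_pres_relu (c :: t)
          rw [hkey, if_neg hp2]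
          rw [ih t (by simp at h; omega)]
          rw [gaScan, if_neg hp1, if_neg hp2]

-- ===== VERDICT (by name: the statement is the Claim_ definition above) =====
theorem ga_italics_filter_spec : Claim_equal_ga_italics_filter := by
  intro s _
  unfold Spec_ga_italics_filter ga_italics_filter ga_italics_filter_alt italics
  simp only [List.foldl]
  rw [PySem.Str.replace, PySem.Str.replace]
  congr 1
  rw [String.toList_ofList]
  rw [replace_eq_repl1 _ _ _ (by simp), replace_eq_repl1 _ _ _ (by simp)]
  rw [show ("<i>" ++ "softmax" ++ "</i>").toList = "<i>softmax</i>".toList from rfl,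
      show ("<i>" ++ "ReLU" ++ "</i>").toList = "<i>ReLU</i>".toList from rfl]
  exact main_aux s.toList.length s.toList (le_refl _)
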